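-- pv_equiv track=rewrite | github.com/rahul494/Data-Structures-and-Algorithms | Strings/palindrome.py | checkPotentialPalindrom
-- ===== SOURCE A (Python) =====
-- def checkPotentialPalindrom(cAr, start, end, altcnt):
--        if end <= start:
--              return True
--
--        if cAr[start] != cAr[end]:
--             altcnt = altcnt + 1
--
--        if altcnt > 1:
--              return False
--
--        return checkPotentialPalindrom(cAr, start + 1, end - 1, altcnt)
-- ===== SOURCE B (Python) =====
-- def checkPotentialPalindrom(cAr, start, end, altcnt):
--     if end <= start:
--         return True
--     mism = sum(1 for k in range((end - start + 1) // 2) if cAr[start + k] != cAr[end - k])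
--     return altcnt + mism <= 1
-- ===== Notes on version B (the rewrite author's own statement) =====
-- stated objective: alternative
-- what changed: Replaces the early-exit recursion by a single closed-form pass: count all mismatched pairs (start+k, end-k) over range((end-start+1)//2) and compare altcnt + mismatches against the threshold 1.
import Mathlib
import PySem

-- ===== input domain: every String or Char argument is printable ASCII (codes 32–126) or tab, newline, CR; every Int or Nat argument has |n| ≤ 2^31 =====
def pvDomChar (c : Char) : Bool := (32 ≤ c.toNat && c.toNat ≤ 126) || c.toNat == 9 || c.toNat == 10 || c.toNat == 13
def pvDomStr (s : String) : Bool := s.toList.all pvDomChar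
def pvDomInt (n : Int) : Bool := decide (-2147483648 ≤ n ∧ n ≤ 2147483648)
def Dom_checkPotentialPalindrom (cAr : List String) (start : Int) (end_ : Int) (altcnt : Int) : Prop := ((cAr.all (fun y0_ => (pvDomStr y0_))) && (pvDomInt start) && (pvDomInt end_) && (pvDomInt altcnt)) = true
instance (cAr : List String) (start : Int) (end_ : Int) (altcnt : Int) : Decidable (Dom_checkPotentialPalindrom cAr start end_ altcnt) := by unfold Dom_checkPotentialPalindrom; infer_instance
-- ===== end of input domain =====

-- B replaces A's early-exit recursion by one closed-form mismatch count over the pair range (alternative decomposition, same cost).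

-- ===== PORT A =====
-- literal port of the recursion; the `| _, _ => false` arm is Python's IndexError, excluded by Pre_
def checkPotentialPalindrom (cAr : List String) (start : Int) (end_ : Int) (altcnt : Int) : Bool :=
  if _h : end_ ≤ start then true
  else
    match PySem.List.pyGet? cAr start, PySem.List.pyGet? cAr end_ with
    | some x, some y =>
        let altcnt' := if x ≠ y then altcnt + 1 else altcnt
        if altcnt' > 1 then false
        else checkPotentialPalindrom cAr (start + 1) (end_ - 1) altcnt'
    | _, _ => false
termination_by (end_ - start).toNat
decreasing_by omega

-- ===== PORT B =====
def checkPotentialPalindrom_alt (cAr : List String) (start : Int) (end_ : Int) (altcnt : Int) : Bool :=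
  if end_ ≤ start then true
  else
    let mism : Nat :=
      (PySem.List.pyRange 0 (PySem.Int.floordiv (end_ - start + 1) 2) 1).countP
        (fun k => PySem.List.pyGet? cAr (start + k) ≠ PySem.List.pyGet? cAr (end_ - k))
    decide (altcnt + (mism : Int) ≤ 1)

-- ===== PRECONDITION & SPEC =====
-- Pre_ excludes exactly the inputs where Python A raises IndexError (end > start with start or end
-- outside the valid index range of cAr); on all such inputs both ports return no meaningful value.
def Pre_checkPotentialPalindrom (cAr : List String) (start : Int) (end_ : Int) (altcnt : Int) : Prop :=
  end_ ≤ start ∨ (-(cAr.length : Int) ≤ start ∧ end_ < (cAr.length : Int))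
instance (cAr : List String) (start : Int) (end_ : Int) (altcnt : Int) : Decidable (Pre_checkPotentialPalindrom cAr start end_ altcnt) := by unfold Pre_checkPotentialPalindrom; infer_instance
def pvWitness_checkPotentialPalindrom : List String × Int × Int × Int := (["a", "b", "a"], 0, 2, 0)

def Spec_checkPotentialPalindrom (cAr : List String) (start : Int) (end_ : Int) (altcnt : Int) (out : Bool) : Prop := out = checkPotentialPalindrom_alt cAr start end_ altcnt
instance (cAr : List String) (start : Int) (end_ : Int) (altcnt : Int) (out : Bool) : Decidable (Spec_checkPotentialPalindrom cAr start end_ altcnt out) := by unfold Spec_checkPotentialPalindrom; infer_instance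

-- ===== CLAIM (what is proved, stated in full; the proofs are below) =====
def Claim_equal_checkPotentialPalindrom : Prop := ∀ (cAr : List String) (start : Int) (end_ : Int) (altcnt : Int), Dom_checkPotentialPalindrom cAr start end_ altcnt → Pre_checkPotentialPalindrom cAr start end_ altcnt → Spec_checkPotentialPalindrom cAr start end_ altcnt (checkPotentialPalindrom cAr start end_ altcnt)

-- ===== LEMMAS AND PROOFS =====

-- proof-side recursive mismatch counter, the bridge between the two ports
def mcount (cAr : List String) (s e : Int) : Nat :=
  if _h : e ≤ s then 0
  else (if PySem.List.pyGet? cAr s ≠ PySem.List.pyGet? cAr e then 1 else 0) + mcount cAr (s + 1) (e - 1)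
termination_by (e - s).toNat
decreasing_by omega

lemma mcount_of_le (cAr : List String) {s e : Int} (h : e ≤ s) : mcount cAr s e = 0 := by
  rw [mcount]; simp [h]

-- A equals the threshold test on the total mismatch count (for end_ > start, indices in range)
lemma A_eq_mcount (cAr : List String) : ∀ n (s e : Int), (e - s).toNat = n → s < e →
    -(cAr.length : Int) ≤ s → e < (cAr.length : Int) → ∀ a : Int,
    checkPotentialPalindrom cAr s e a = decide (a + (mcount cAr s e : Int) ≤ 1) := by
  intro n
  induction n using Nat.strong_induction_on with
  | _ n ih =>
    intro s e hn hlt hs he a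
    have hslen : s < (cAr.length : Int) := lt_of_lt_of_le hlt he.le
    have helen : -(cAr.length : Int) ≤ e := le_trans hs hlt.le
    obtain ⟨x, hx⟩ : ∃ x, PySem.List.pyGet? cAr s = some x := by
      cases h : PySem.List.pyGet? cAr s with
      | none =>
        rw [PySem.List.pyGet?_eq_none_iff] at h
        exact absurd (by simp [PySem.Raise.InRange]; omega) h
      | some x => exact ⟨x, rfl⟩
    obtain ⟨y, hy⟩ : ∃ y, PySem.List.pyGet? cAr e = some y := by
      cases h : PySem.List.pyGet? cAr e with
      | none =>
        rw [PySem.List.pyGet?_eq_none_iff] at h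
        exact absurd (by simp [PySem.Raise.InRange]; omega) h
      | some y => exact ⟨y, rfl⟩
    rw [checkPotentialPalindrom, mcount]
    simp only [dif_neg (not_le.2 hlt), hx, hy]
    set a' : Int := if x ≠ y then a + 1 else a with ha'
    have hm1 : ((if some x ≠ some y then 1 else 0 : Nat) : Int) = a' - a := by
      by_cases hxy : x = y <;> simp [hxy, ha']
    by_cases hgt : a' > 1
    · simp only [if_pos hgt]
      symm
      rw [decide_eq_false_iff_not]
      push_cast [hm1]
      omega
    · simp only [if_neg hgt]
      by_cases hend : e - 1 ≤ s + 1
      · rw [checkPotentialPalindrom]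
        rw [dif_pos hend, mcount_of_le cAr hend]
        symm
        rw [decide_eq_true_eq]
        push_cast [hm1]
        omega
      · rw [ih ((e - 1) - (s + 1)).toNat (by omega) (s + 1) (e - 1) rfl (by omega) (by omega) (by omega) a']
        rw [decide_eq_decide]
        push_cast [hm1]
        omega

-- B's range count equals mcount
lemma count_eq_mcount (cAr : List String) : ∀ n (s e : Int), (e - s).toNat = n →
    (PySem.List.pyRange 0 (PySem.Int.floordiv (e - s + 1) 2) 1).countP
      (fun k => PySem.List.pyGet? cAr (s + k) ≠ PySem.List.pyGet? cAr (e - k)) = mcount cAr s e := by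
  intro n
  induction n using Nat.strong_induction_on with
  | _ n ih =>
    intro s e hn
    by_cases hle : e ≤ s
    · have hfd : PySem.Int.floordiv (e - s + 1) 2 ≤ 0 := by
        rw [PySem.Int.floordiv_eq_ediv_of_pos (by omega)]; omega
      rw [PySem.List.pyRange_one_eq_nil hfd, mcount_of_le cAr hle]
      rfl
    · have hlt : s < e := lt_of_not_ge hle
      have hfd : PySem.Int.floordiv (e - s + 1) 2 = PySem.Int.floordiv ((e - 1) - (s + 1) + 1) 2 + 1 := by
        rw [PySem.Int.floordiv_eq_ediv_of_pos (by omega), PySem.Int.floordiv_eq_ediv_of_pos (by omega)]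
        omega
      have hpos : (0 : Int) < PySem.Int.floordiv (e - s + 1) 2 := by
        rw [PySem.Int.floordiv_eq_ediv_of_pos (by omega)]; omega
      rw [mcount, dif_neg hle]
      rw [PySem.List.pyRange_one_cons hpos, List.countP_cons]
      have hshift : (PySem.List.pyRange (0 + 1) (PySem.Int.floordiv (e - s + 1) 2) 1).countP
          (fun k => PySem.List.pyGet? cAr (s + k) ≠ PySem.List.pyGet? cAr (e - k))
          = (PySem.List.pyRange 0 (PySem.Int.floordiv ((e - 1) - (s + 1) + 1) 2) 1).countP
          (fun k => PySem.List.pyGet? cAr ((s + 1) + k) ≠ PySem.List.pyGet? cAr ((e - 1) - k)) := by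
        rw [PySem.List.pyRange_one, PySem.List.pyRange_one, List.countP_map, List.countP_map]
        have hlen : (PySem.Int.floordiv (e - s + 1) 2 - (0 + 1)).toNat
            = (PySem.Int.floordiv ((e - 1) - (s + 1) + 1) 2 - 0).toNat := by
          have : (0 : Int) ≤ PySem.Int.floordiv ((e - 1) - (s + 1) + 1) 2 := by
            rw [PySem.Int.floordiv_eq_ediv_of_pos (by omega)]; omega
          omega
        rw [hlen]
        apply List.countP_congr
        intro k _
        have h1 : s + (0 + 1 + (k : Int)) = s + 1 + (0 + (k : Int)) := by ring
        have h2 : e - (0 + 1 + (k : Int)) = e - 1 - (0 + (k : Int)) := by ring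
        simp only [Function.comp_apply, h1, h2]
      rw [hshift, ih ((e - 1) - (s + 1)).toNat (by omega) (s + 1) (e - 1) rfl]
      simp only [decide_eq_true_eq]
      by_cases hxy : PySem.List.pyGet? cAr s = PySem.List.pyGet? cAr e <;> simp [hxy] <;> omega

-- ===== VERDICT (by name: the statement is the Claim_ definition above) =====
theorem checkPotentialPalindrom_spec : Claim_equal_checkPotentialPalindrom := by
  intro cAr start end_ altcnt _hd hpre
  unfold Spec_checkPotentialPalindrom checkPotentialPalindrom_alt
  by_cases h : end_ ≤ start
  · rw [checkPotentialPalindrom]; simp [h]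
  · have hlt : start < end_ := lt_of_not_ge h
    rcases hpre with h' | ⟨hs, he⟩
    · exact absurd h' h
    · simp only [if_neg h]
      rw [count_eq_mcount cAr (end_ - start).toNat start end_ rfl]
      exact A_eq_mcount cAr (end_ - start).toNat start end_ rfl hlt hs he altcnt
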